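-- pv_equiv track=rewrite | github.com/spsree4u/MySolvings | arrays/largest_sub_array.py | find_length_2
-- ===== SOURCE A (Python) =====
-- def find_length_2(arr):
--     result = 1
--     for i in range(len(arr)):
--         mn = mx = arr[i]
--         for j in range(i+1, len(arr)):
--             mn = min(mn, arr[j])
--             mx = max(mx, arr[j])
--             if mx-mn == j-i:
--                 result = max(result, mx-mn+1)
--     return result
-- ===== SOURCE B (Python) =====
-- def find_length_2(arr):
--     def solve(lo, hi):
--         # best window length over subarray windows within arr[lo:hi], minimum 1
--         if hi - lo <= 1:
--             return 1
--         mid = (lo + hi) // 2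
--         best = max(solve(lo, mid), solve(mid, hi))
--         # prefix (min, max) of arr[mid..j] for each right end j in [mid, hi)
--         pre = []
--         mn = mx = arr[mid]
--         for j in range(mid, hi):
--             mn = min(mn, arr[j])
--             mx = max(mx, arr[j])
--             pre.append((j, mn, mx))
--         # extend left end i from mid-1 down to lo; combine with each precomputed right part
--         lmn = lmx = arr[mid - 1]
--         for i in range(mid - 1, lo - 1, -1):
--             lmn = min(lmn, arr[i])
--             lmx = max(lmx, arr[i])
--             for j, bmn, bmx in pre:
--                 wmn = min(lmn, bmn)
--                 wmx = max(lmx, bmx)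
--                 if wmx - wmn == j - i:
--                     best = max(best, wmx - wmn + 1)
--         return best
--     return solve(0, len(arr)) if arr else 1
-- ===== Notes on version B (the rewrite author's own statement) =====
-- stated objective: alternative
-- what changed: B replaces A's doubly nested left-anchored scan by divide and conquer: it recurses on the two halves and handles windows crossing the midpoint by precomputing prefix (min,max) pairs of the right half once and combining them with running suffix (min,max) of the left half; equality rests on partitioning the window set and on order-independence of the running maximum.
import Mathlib
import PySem

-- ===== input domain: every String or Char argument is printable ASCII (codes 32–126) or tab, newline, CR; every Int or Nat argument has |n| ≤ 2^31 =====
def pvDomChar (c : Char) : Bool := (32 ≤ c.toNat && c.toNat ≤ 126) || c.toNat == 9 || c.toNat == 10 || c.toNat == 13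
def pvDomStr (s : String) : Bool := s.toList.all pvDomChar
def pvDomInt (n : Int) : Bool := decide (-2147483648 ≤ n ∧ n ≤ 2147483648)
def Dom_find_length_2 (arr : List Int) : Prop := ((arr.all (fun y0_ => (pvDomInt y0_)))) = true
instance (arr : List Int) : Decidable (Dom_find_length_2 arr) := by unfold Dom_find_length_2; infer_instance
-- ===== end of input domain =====

-- B replaces A's doubly nested scan by divide and conquer on the index range (halves plus
-- midpoint-crossing windows combined from precomputed prefix/suffix min-max pairs); same cost,
-- genuinely different recursive structure.

-- ===== PORT A =====
-- A's indices are always in range, so `arr.getD k 0` is exact for Python's `arr[k]`.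
def find_length_2 (arr : List Int) : Int :=
  (List.range arr.length).foldl (fun result i =>
    let a := arr.getD i 0
    (((List.range' (i + 1) (arr.length - (i + 1))).foldl
      (fun (st : Int × Int × Int) j =>
        let mn := min st.1 (arr.getD j 0)
        let mx := max st.2.1 (arr.getD j 0)
        (mn, mx, if mx - mn = (j : Int) - (i : Int) then max st.2.2 (mx - mn + 1) else st.2.2))
      (a, a, result)).2.2)) 1

-- ===== PORT B =====
-- B's helper solve(lo, hi): recursion on the two halves, then the crossing windows,
-- transliterated loop for loop from Source B (`pre` is the list of (j, mn, mx) triples).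
-- The extra first argument is fuel making the recursion structural; hi - lo ≤ fuel always
-- holds at the call sites, so the fuel guard never changes the computed value.
def pvSolve (arr : List Int) : Nat → Nat → Nat → Int
  | 0, _, _ => 1
  | n + 1, lo, hi =>
    if hi ≤ lo + 1 then 1
    else
      let mid := (lo + hi) / 2
      let best := max (pvSolve arr n lo mid) (pvSolve arr n mid hi)
      let pre := ((List.range' mid (hi - mid)).foldl
        (fun (st : Int × Int × List (Nat × Int × Int)) j =>
          let mn := min st.1 (arr.getD j 0)
          let mx := max st.2.1 (arr.getD j 0)
          (mn, mx, st.2.2 ++ [(j, mn, mx)]))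
        (arr.getD mid 0, arr.getD mid 0, [])).2.2
      (((List.range' lo (mid - lo)).reverse.foldl
        (fun (st : Int × Int × Int) i =>
          let lmn := min st.1 (arr.getD i 0)
          let lmx := max st.2.1 (arr.getD i 0)
          (lmn, lmx,
            pre.foldl (fun r t =>
              let wmn := min lmn t.2.1
              let wmx := max lmx t.2.2
              if wmx - wmn = (t.1 : Int) - (i : Int) then max r (wmx - wmn + 1) else r) st.2.2))
        (arr.getD (mid - 1) 0, arr.getD (mid - 1) 0, best)).2.2)

def find_length_2_alt (arr : List Int) : Int :=
  if arr = [] then 1 else pvSolve arr arr.length 0 arr.length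

-- ===== PRECONDITION & SPEC =====
def Spec_find_length_2 (arr : List Int) (out : Int) : Prop := out = find_length_2_alt arr
instance (arr : List Int) (out : Int) : Decidable (Spec_find_length_2 arr out) := by unfold Spec_find_length_2; infer_instance

-- ===== CLAIM (what is proved, stated in full; the proofs are below) =====
def Claim_equal_find_length_2 : Prop := ∀ (arr : List Int), Dom_find_length_2 arr → Spec_find_length_2 arr (find_length_2 arr)

-- ===== LEMMAS AND PROOFS =====

-- min/max of the window arr[i..j] (endpoints included)
def pvSeg (arr : List Int) (i j : Nat) : List Int :=
  (List.range' i (j + 1 - i)).map (fun k => arr.getD k 0)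

def pvMn (arr : List Int) (i j : Nat) : Int := (pvSeg arr i j).foldl min (arr.getD i 0)
def pvMx (arr : List Int) (i j : Nat) : Int := (pvSeg arr i j).foldl max (arr.getD i 0)

-- contribution of a single window (i,j) to the running result
def pvStep (arr : List Int) (r : Int) (p : Nat × Nat) : Int :=
  if pvMx arr p.1 p.2 - pvMn arr p.1 p.2 = (p.2 : Int) - (p.1 : Int)
  then max r (pvMx arr p.1 p.2 - pvMn arr p.1 p.2 + 1) else r

-- all windows i < j inside [lo, hi), A's row-major order
def pvWin (lo hi : Nat) : List (Nat × Nat) :=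
  (List.range' lo (hi - lo)).flatMap (fun i =>
    (List.range' (i + 1) (hi - (i + 1))).map (fun j => (i, j)))

-- crossing windows in B's order: left end descending from mid-1, right end ascending from mid
def pvCross (lo mid hi : Nat) : List (Nat × Nat) :=
  (List.range' lo (mid - lo)).reverse.flatMap (fun i =>
    (List.range' mid (hi - mid)).map (fun j => (i, j)))

theorem pvFoldlMin (l : List Int) (a b : Int) :
    l.foldl min (min a b) = min a (l.foldl min b) := by
  induction l generalizing b with
  | nil => rfl
  | cons x l ih => simp only [List.foldl_cons, min_assoc, ih]

theorem pvFoldlMax (l : List Int) (a b : Int) :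
    l.foldl max (max a b) = max a (l.foldl max b) := by
  induction l generalizing b with
  | nil => rfl
  | cons x l ih => simp only [List.foldl_cons, max_assoc, ih]

theorem pvSeg_self (arr : List Int) (i : Nat) : pvSeg arr i i = [arr.getD i 0] := by
  simp [pvSeg, show i + 1 - i = 1 from by omega]

theorem pvMn_self (arr : List Int) (i : Nat) : pvMn arr i i = arr.getD i 0 := by
  simp [pvMn, pvSeg_self]

theorem pvMx_self (arr : List Int) (i : Nat) : pvMx arr i i = arr.getD i 0 := by
  simp [pvMx, pvSeg_self]

theorem pvSeg_concat (arr : List Int) (i j : Nat) (h : i ≤ j + 1) :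
    pvSeg arr i (j + 1) = pvSeg arr i j ++ [arr.getD (j + 1) 0] := by
  unfold pvSeg
  rcases Nat.eq_or_lt_of_le h with h' | h'
  · subst h'
    simp [show j + 1 + 1 - (j + 1) = 1 from by omega]
  · have h2 : j + 1 + 1 - i = (j + 1 - i) + 1 := by omega
    rw [h2, List.range'_concat, List.map_append]
    rw [show i + 1 * (j + 1 - i) = j + 1 from by omega]
    simp

theorem pvMn_concat (arr : List Int) (i j : Nat) (h : i ≤ j) :
    pvMn arr i (j + 1) = min (pvMn arr i j) (arr.getD (j + 1) 0) := by
  simp [pvMn, pvSeg_concat arr i j (by omega)]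

theorem pvMx_concat (arr : List Int) (i j : Nat) (h : i ≤ j) :
    pvMx arr i (j + 1) = max (pvMx arr i j) (arr.getD (j + 1) 0) := by
  simp [pvMx, pvSeg_concat arr i j (by omega)]

theorem pvSeg_cons (arr : List Int) (i j : Nat) (h : i ≤ j) :
    pvSeg arr i j = arr.getD i 0 :: pvSeg arr (i + 1) j := by
  unfold pvSeg
  have h2 : j + 1 - i = (j - i) + 1 := by omega
  have h3 : j + 1 - (i + 1) = j - i := by omega
  rw [h2, List.range'_succ, h3, List.map_cons]

theorem pvMn_cons (arr : List Int) (i j : Nat) (h : i < j) :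
    pvMn arr i j = min (arr.getD i 0) (pvMn arr (i + 1) j) := by
  unfold pvMn
  rw [pvSeg_cons arr i j (by omega), pvSeg_cons arr (i + 1) j (by omega)]
  simp only [List.foldl_cons, min_self]
  rw [pvFoldlMin]

theorem pvMx_cons (arr : List Int) (i j : Nat) (h : i < j) :
    pvMx arr i j = max (arr.getD i 0) (pvMx arr (i + 1) j) := by
  unfold pvMx
  rw [pvSeg_cons arr i j (by omega), pvSeg_cons arr (i + 1) j (by omega)]
  simp only [List.foldl_cons, max_self]
  rw [pvFoldlMax]

-- folding min over a segment from any seed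
theorem pvFoldSeg_min (arr : List Int) :
    ∀ (t m : Nat) (c : Int), (pvSeg arr m (m + t)).foldl min c = min c (pvMn arr m (m + t)) := by
  intro t
  induction t with
  | zero => intro m c; simp [pvSeg_self, pvMn_self]
  | succ t ih =>
    intro m c
    rw [pvSeg_cons arr m (m + (t+1)) (by omega), List.foldl_cons]
    rw [show m + (t + 1) = (m + 1) + t from by omega, ih (m + 1) _]
    rw [pvMn_cons arr m ((m+1)+t) (by omega)]
    rw [min_assoc]

theorem pvFoldSeg_max (arr : List Int) :
    ∀ (t m : Nat) (c : Int), (pvSeg arr m (m + t)).foldl max c = max c (pvMx arr m (m + t)) := by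
  intro t
  induction t with
  | zero => intro m c; simp [pvSeg_self, pvMx_self]
  | succ t ih =>
    intro m c
    rw [pvSeg_cons arr m (m + (t+1)) (by omega), List.foldl_cons]
    rw [show m + (t + 1) = (m + 1) + t from by omega, ih (m + 1) _]
    rw [pvMx_cons arr m ((m+1)+t) (by omega)]
    rw [max_assoc]

theorem pvSeg_split (arr : List Int) (i m j : Nat) (h1 : i < m) (h2 : m ≤ j) :
    pvSeg arr i j = pvSeg arr i (m - 1) ++ pvSeg arr m j := by
  unfold pvSeg
  rw [← List.map_append]
  congr 1
  have h3 : m - 1 + 1 - i = m - i := by omega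
  rw [h3]
  rw [show j + 1 - i = (m - i) + (j + 1 - m) from by omega, ← List.range'_append]
  rw [show i + 1 * (m - i) = m from by omega]

theorem pvMn_split (arr : List Int) (i m j : Nat) (h1 : i < m) (h2 : m ≤ j) :
    pvMn arr i j = min (pvMn arr i (m - 1)) (pvMn arr m j) := by
  unfold pvMn
  rw [pvSeg_split arr i m j h1 h2, List.foldl_append]
  have := pvFoldSeg_min arr (j - m) m ((pvSeg arr i (m-1)).foldl min (arr.getD i 0))
  rw [show m + (j - m) = j from by omega] at this
  exact this

theorem pvMx_split (arr : List Int) (i m j : Nat) (h1 : i < m) (h2 : m ≤ j) :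
    pvMx arr i j = max (pvMx arr i (m - 1)) (pvMx arr m j) := by
  unfold pvMx
  rw [pvSeg_split arr i m j h1 h2, List.foldl_append]
  have := pvFoldSeg_max arr (j - m) m ((pvSeg arr i (m-1)).foldl max (arr.getD i 0))
  rw [show m + (j - m) = j from by omega] at this
  exact this

-- pvStep distributed over max, and consequences
theorem pvStep_max (arr : List Int) (a b : Int) (p : Nat × Nat) :
    pvStep arr (max a b) p = max a (pvStep arr b p) := by
  unfold pvStep
  split_ifs <;> [exact max_assoc a b _ ▸ rfl; rfl]

theorem pvFold_max (arr : List Int) (l : List (Nat × Nat)) (a b : Int) :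
    l.foldl (pvStep arr) (max a b) = max a (l.foldl (pvStep arr) b) := by
  induction l generalizing b with
  | nil => rfl
  | cons x l ih => simp only [List.foldl_cons, pvStep_max, ih]

theorem pvFold_ge (arr : List Int) (l : List (Nat × Nat)) (b : Int) :
    b ≤ l.foldl (pvStep arr) b := by
  have h := pvFold_max arr l b b
  rw [max_self] at h
  rw [h]; exact le_max_left _ _

theorem pvFold_one (arr : List Int) (l : List (Nat × Nat)) (b : Int) (h : 1 ≤ b) :
    l.foldl (pvStep arr) b = max b (l.foldl (pvStep arr) 1) := by
  calc l.foldl (pvStep arr) b = l.foldl (pvStep arr) (max b 1) := by rw [max_eq_left h]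
    _ = max b (l.foldl (pvStep arr) 1) := pvFold_max arr l b 1

-- A's inner loop computes running (min, max, result) over the windows with left end i
theorem pvInnerA (arr : List Int) (i : Nat) :
    ∀ (t j0 : Nat) (r : Int), i ≤ j0 →
    (List.range' (j0 + 1) t).foldl
      (fun (st : Int × Int × Int) j =>
        let mn := min st.1 (arr.getD j 0)
        let mx := max st.2.1 (arr.getD j 0)
        (mn, mx, if mx - mn = (j : Int) - (i : Int) then max st.2.2 (mx - mn + 1) else st.2.2))
      (pvMn arr i j0, pvMx arr i j0, r)
    = (pvMn arr i (j0 + t), pvMx arr i (j0 + t),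
       ((List.range' (j0 + 1) t).map (fun j => (i, j))).foldl (pvStep arr) r) := by
  intro t
  induction t with
  | zero => intro j0 r _; rfl
  | succ t ih =>
    intro j0 r h
    rw [List.range'_succ, List.foldl_cons, List.map_cons, List.foldl_cons]
    simp only
    rw [← pvMn_concat arr i j0 h, ← pvMx_concat arr i j0 h]
    rw [ih (j0 + 1) _ (by omega)]
    rw [show j0 + 1 + t = j0 + (t + 1) from by omega]
    simp only [Prod.mk.injEq, true_and]
    congr 1

theorem pvA_win (arr : List Int) :
    find_length_2 arr = (pvWin 0 arr.length).foldl (pvStep arr) 1 := by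
  unfold find_length_2 pvWin
  rw [List.foldl_flatMap]
  rw [Nat.sub_zero, ← List.range_eq_range']
  refine List.foldl_ext _ _ 1 ?_
  intro r i _
  simp only
  have h0 : ((arr.getD i 0, arr.getD i 0, r) : Int × Int × Int)
      = (pvMn arr i i, pvMx arr i i, r) := by rw [pvMn_self, pvMx_self]
  rw [h0, pvInnerA arr i (arr.length - (i + 1)) i r (le_refl i)]

-- the `pre` list built by B's first crossing loop
theorem pvPreBuild (arr : List Int) (m : Nat) :
    ∀ (t j0 : Nat) (acc : List (Nat × Int × Int)), m ≤ j0 →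
    (List.range' (j0 + 1) t).foldl
      (fun (st : Int × Int × List (Nat × Int × Int)) j =>
        let mn := min st.1 (arr.getD j 0)
        let mx := max st.2.1 (arr.getD j 0)
        (mn, mx, st.2.2 ++ [(j, mn, mx)]))
      (pvMn arr m j0, pvMx arr m j0, acc)
    = (pvMn arr m (j0 + t), pvMx arr m (j0 + t),
       acc ++ (List.range' (j0 + 1) t).map (fun j => (j, pvMn arr m j, pvMx arr m j))) := by
  intro t
  induction t with
  | zero => intro j0 acc _; simp
  | succ t ih =>
    intro j0 acc h
    rw [List.range'_succ, List.foldl_cons]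
    simp only
    rw [← pvMn_concat arr m j0 h, ← pvMx_concat arr m j0 h]
    rw [ih (j0 + 1) _ (by omega)]
    rw [show j0 + 1 + t = j0 + (t + 1) from by omega]
    simp

theorem pvPre_eq (arr : List Int) (m hi : Nat) (h : m < hi) :
    ((List.range' m (hi - m)).foldl
      (fun (st : Int × Int × List (Nat × Int × Int)) j =>
        let mn := min st.1 (arr.getD j 0)
        let mx := max st.2.1 (arr.getD j 0)
        (mn, mx, st.2.2 ++ [(j, mn, mx)]))
      (arr.getD m 0, arr.getD m 0, [])).2.2
    = (List.range' m (hi - m)).map (fun j => (j, pvMn arr m j, pvMx arr m j)) := by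
  have h1 : hi - m = (hi - m - 1) + 1 := by omega
  rw [h1, List.range'_succ, List.foldl_cons, List.map_cons]
  simp only [min_self, max_self, List.nil_append]
  have h0 : ((arr.getD m 0, arr.getD m 0, [(m, arr.getD m 0, arr.getD m 0)]) :
      Int × Int × List (Nat × Int × Int))
      = (pvMn arr m m, pvMx arr m m, [(m, pvMn arr m m, pvMx arr m m)]) := by
    rw [pvMn_self, pvMx_self]
  rw [h0, pvPreBuild arr m (hi - m - 1) m _ (le_refl m)]
  simp

-- the inner crossing fold over `pre` is the pvStep fold over the windows (i, ·)
theorem pvInnerCross (arr : List Int) (mid hi i : Nat) (hi2 : i < mid)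
    (r : Int) :
    ((List.range' mid (hi - mid)).map (fun j => (j, pvMn arr mid j, pvMx arr mid j))).foldl
      (fun r t =>
        let wmn := min (pvMn arr i (mid - 1)) t.2.1
        let wmx := max (pvMx arr i (mid - 1)) t.2.2
        if wmx - wmn = (t.1 : Int) - (i : Int) then max r (wmx - wmn + 1) else r) r
    = ((List.range' mid (hi - mid)).map (fun j => (i, j))).foldl (pvStep arr) r := by
  rw [List.foldl_map, List.foldl_map]
  refine List.foldl_ext _ _ r ?_
  intro r j hj
  have hj1 : mid ≤ j := by
    rcases List.mem_range'_1.mp hj with ⟨h1, _⟩; omega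
  simp only [pvStep]
  rw [← pvMn_split arr i mid j hi2 hj1, ← pvMx_split arr i mid j hi2 hj1]

-- B's outer crossing loop, inner indices strictly below mid - 1 handled by induction
theorem pvOuterCross (arr : List Int) (lo mid hi : Nat) :
    ∀ (t : Nat) (r : Int), lo + t ≤ mid - 1 → lo < mid →
    (List.range' lo t).reverse.foldl
      (fun (st : Int × Int × Int) i =>
        let lmn := min st.1 (arr.getD i 0)
        let lmx := max st.2.1 (arr.getD i 0)
        (lmn, lmx,
          (((List.range' mid (hi - mid)).map (fun j => (j, pvMn arr mid j, pvMx arr mid j)))).foldl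
            (fun r t =>
              let wmn := min lmn t.2.1
              let wmx := max lmx t.2.2
              if wmx - wmn = (t.1 : Int) - (i : Int) then max r (wmx - wmn + 1) else r) st.2.2))
      (pvMn arr (lo + t) (mid - 1), pvMx arr (lo + t) (mid - 1), r)
    = (pvMn arr lo (mid - 1), pvMx arr lo (mid - 1),
       ((List.range' lo t).reverse.flatMap (fun i =>
          (List.range' mid (hi - mid)).map (fun j => (i, j)))).foldl (pvStep arr) r) := by
  intro t
  induction t with
  | zero => intro r _ _; rfl
  | succ t ih =>
    intro r h hlm
    rw [List.range'_concat, List.reverse_append]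
    simp only [List.reverse_cons, List.reverse_nil, List.nil_append, List.cons_append,
      List.foldl_cons, List.flatMap_cons]
    rw [min_comm (pvMn arr (lo + (t+1)) (mid-1)), max_comm (pvMx arr (lo + (t+1)) (mid-1))]
    rw [show lo + 1 * t = lo + t from by omega]
    rw [show lo + (t + 1) = lo + t + 1 from by omega]
    rw [← pvMn_cons arr (lo + t) (mid - 1) (by omega),
        ← pvMx_cons arr (lo + t) (mid - 1) (by omega)]
    rw [pvInnerCross arr mid hi (lo + t) (by omega) r]
    rw [ih _ (by omega) hlm]
    rw [List.foldl_append]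

-- membership and nodup facts for the window lists
theorem pvMem_win (lo hi : Nat) (p : Nat × Nat) :
    p ∈ pvWin lo hi ↔ lo ≤ p.1 ∧ p.1 < p.2 ∧ p.2 < hi := by
  obtain ⟨i, j⟩ := p
  simp only [pvWin, List.mem_flatMap, List.mem_range'_1, List.mem_map, Prod.mk.injEq]
  constructor
  · rintro ⟨i', ⟨hi1, hi2⟩, j', ⟨hj1, hj2⟩, rfl, rfl⟩; omega
  · rintro ⟨h1, h2, h3⟩; exact ⟨i, ⟨h1, by omega⟩, j, ⟨by omega, by omega⟩, rfl, rfl⟩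

theorem pvMem_cross (lo mid hi : Nat) (p : Nat × Nat) :
    p ∈ pvCross lo mid hi ↔ lo ≤ p.1 ∧ p.1 < mid ∧ mid ≤ p.2 ∧ p.2 < hi := by
  obtain ⟨i, j⟩ := p
  simp only [pvCross, List.mem_flatMap, List.mem_reverse, List.mem_range'_1, List.mem_map,
    Prod.mk.injEq]
  constructor
  · rintro ⟨i', ⟨hi1, hi2⟩, j', ⟨hj1, hj2⟩, rfl, rfl⟩; omega
  · rintro ⟨h1, h2, h3, h4⟩; exact ⟨i, ⟨h1, by omega⟩, j, ⟨h3, by omega⟩, rfl, rfl⟩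

theorem pvNodup_win (lo hi : Nat) : (pvWin lo hi).Nodup := by
  unfold pvWin
  rw [List.nodup_flatMap]
  constructor
  · intro i _
    exact (List.nodup_range').map (fun a b h => by simpa using h)
  · have h := (List.nodup_range' (s := lo) (n := hi - lo) (step := 1))
    refine h.imp ?_
    intro a b hab p hp1 hp2
    simp only [List.mem_map] at hp1 hp2
    obtain ⟨j1, _, rfl⟩ := hp1
    obtain ⟨j2, _, h2⟩ := hp2
    exact hab (by simpa using congrArg Prod.fst h2.symm)

theorem pvNodup_cross (lo mid hi : Nat) : (pvCross lo mid hi).Nodup := by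
  unfold pvCross
  rw [List.nodup_flatMap]
  constructor
  · intro i _
    exact (List.nodup_range').map (fun a b h => by simpa using h)
  · have h := List.nodup_reverse.2 (List.nodup_range' (s := lo) (n := mid - lo) (step := 1))
    refine h.imp ?_
    intro a b hab p hp1 hp2
    simp only [List.mem_map] at hp1 hp2
    obtain ⟨j1, _, rfl⟩ := hp1
    obtain ⟨j2, _, h2⟩ := hp2
    exact hab (by simpa using congrArg Prod.fst h2.symm)

theorem pvPerm_split (lo mid hi : Nat) (h1 : lo < mid) (h2 : mid < hi) :
    (pvWin lo hi).Perm (pvWin lo mid ++ pvWin mid hi ++ pvCross lo mid hi) := by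
  have hd1 : List.Disjoint (pvWin lo mid) (pvWin mid hi) := by
    intro p hp hq
    rw [pvMem_win] at hp hq; omega
  have hd2 : List.Disjoint (pvWin lo mid ++ pvWin mid hi) (pvCross lo mid hi) := by
    intro p hp hq
    rw [List.mem_append, pvMem_win, pvMem_win] at hp
    rw [pvMem_cross] at hq; omega
  have hnd : (pvWin lo mid ++ pvWin mid hi ++ pvCross lo mid hi).Nodup := by
    refine List.Nodup.append ?_ (pvNodup_cross lo mid hi) hd2
    exact List.Nodup.append (pvNodup_win lo mid) (pvNodup_win mid hi) hd1
  apply List.perm_of_nodup_nodup_toFinset_eq (pvNodup_win lo hi) hnd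
  ext p
  simp only [List.mem_toFinset, List.mem_append, pvMem_win, pvMem_cross]
  omega

theorem pvStep_rcomm (arr : List Int) (z : Int) (x y : Nat × Nat) :
    pvStep arr (pvStep arr z x) y = pvStep arr (pvStep arr z y) x := by
  unfold pvStep
  split_ifs <;> first | rfl | exact max_right_comm z _ _

theorem pvFold_one_ge (arr : List Int) (l : List (Nat × Nat)) :
    (1 : Int) ≤ l.foldl (pvStep arr) 1 := pvFold_ge arr l 1

theorem pvWin_nil (lo hi : Nat) (h : hi ≤ lo + 1) : pvWin lo hi = [] := by
  unfold pvWin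
  by_cases h' : hi ≤ lo
  · rw [show hi - lo = 0 from by omega]; rfl
  · rw [show hi - lo = 1 from by omega]
    simp [List.range'_one, show hi - (lo + 1) = 0 from by omega]

-- the inner crossing fold for the first outer iteration i = mid - 1
theorem pvInnerCrossSelf (arr : List Int) (mid hi : Nat) (h : 1 ≤ mid) (r : Int) :
    ((List.range' mid (hi - mid)).map (fun j => (j, pvMn arr mid j, pvMx arr mid j))).foldl
      (fun r t =>
        let wmn := min (arr.getD (mid - 1) 0) t.2.1
        let wmx := max (arr.getD (mid - 1) 0) t.2.2
        if wmx - wmn = (t.1 : Int) - ((mid - 1 : Nat) : Int) then max r (wmx - wmn + 1) else r) r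
    = ((List.range' mid (hi - mid)).map (fun j => ((mid - 1 : Nat), j))).foldl (pvStep arr) r := by
  rw [List.foldl_map, List.foldl_map]
  refine List.foldl_ext _ _ r ?_
  intro r j hj
  have hj1 : mid ≤ j := by rcases List.mem_range'_1.mp hj with ⟨h1, _⟩; omega
  simp only [pvStep]
  rw [pvMn_split arr (mid - 1) mid j (by omega) hj1,
      pvMx_split arr (mid - 1) mid j (by omega) hj1, pvMn_self, pvMx_self]

-- B's whole crossing phase (both loops) is the pvStep fold over pvCross
theorem pvOuterFull (arr : List Int) (lo mid hi : Nat) (h1 : lo < mid) (r : Int) :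
    ((List.range' lo (mid - lo)).reverse.foldl
      (fun (st : Int × Int × Int) i =>
        let lmn := min st.1 (arr.getD i 0)
        let lmx := max st.2.1 (arr.getD i 0)
        (lmn, lmx,
          ((List.range' mid (hi - mid)).map (fun j => (j, pvMn arr mid j, pvMx arr mid j))).foldl
            (fun r t =>
              let wmn := min lmn t.2.1
              let wmx := max lmx t.2.2
              if wmx - wmn = (t.1 : Int) - (i : Int) then max r (wmx - wmn + 1) else r) st.2.2))
      (arr.getD (mid - 1) 0, arr.getD (mid - 1) 0, r)).2.2
    = (pvCross lo mid hi).foldl (pvStep arr) r := by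
  have hrange : List.range' lo (mid - lo) = List.range' lo (mid - 1 - lo) ++ [mid - 1] := by
    rw [show mid - lo = (mid - 1 - lo) + 1 from by omega, List.range'_concat,
        show lo + 1 * (mid - 1 - lo) = mid - 1 from by omega]
  rw [hrange, List.reverse_append]
  simp only [List.reverse_cons, List.reverse_nil, List.nil_append, List.cons_append,
    List.foldl_cons]
  rw [min_self, max_self]
  rw [pvInnerCrossSelf arr mid hi (by omega) r]
  have einit : ((arr.getD (mid - 1) 0, arr.getD (mid - 1) 0,
      ((List.range' mid (hi - mid)).map (fun j => ((mid - 1 : Nat), j))).foldl (pvStep arr) r) :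
      Int × Int × Int)
      = (pvMn arr (mid - 1) (mid - 1), pvMx arr (mid - 1) (mid - 1),
         ((List.range' mid (hi - mid)).map (fun j => ((mid - 1 : Nat), j))).foldl (pvStep arr) r) := by
    rw [pvMn_self, pvMx_self]
  rw [einit]
  have key := pvOuterCross arr lo mid hi (mid - 1 - lo)
      (((List.range' mid (hi - mid)).map (fun j => ((mid - 1 : Nat), j))).foldl (pvStep arr) r)
      (by omega) h1
  rw [show lo + (mid - 1 - lo) = mid - 1 from by omega] at key
  rw [key]
  dsimp only
  rw [pvCross, hrange, List.reverse_append]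
  simp only [List.reverse_cons, List.reverse_nil, List.nil_append, List.cons_append,
    List.flatMap_cons]
  rw [List.foldl_append]

-- B's recursion computes the fold over all windows inside [lo, hi)
theorem pvSolve_eq (arr : List Int) :
    ∀ (n lo hi : Nat), hi - lo ≤ n →
    pvSolve arr n lo hi = (pvWin lo hi).foldl (pvStep arr) 1 := by
  intro n
  induction n with
  | zero =>
    intro lo hi h
    rw [pvSolve, pvWin_nil lo hi (by omega)]
    rfl
  | succ n ih =>
    intro lo hi h
    by_cases hle : hi ≤ lo + 1
    · rw [pvSolve, if_pos hle, pvWin_nil lo hi hle]; rfl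
    · rw [pvSolve, if_neg hle]
      simp only
      set mid := (lo + hi) / 2 with hmid
      have hm1 : lo < mid := by omega
      have hm2 : mid < hi := by omega
      rw [ih lo mid (by omega), ih mid hi (by omega)]
      rw [pvPre_eq arr mid hi hm2]
      rw [pvOuterFull arr lo mid hi hm1]
      have hperm := pvPerm_split lo mid hi hm1 hm2
      rw [hperm.foldl_eq' (fun x _ y _ z => pvStep_rcomm arr z x y) 1]
      rw [List.foldl_append, List.foldl_append]
      rw [pvFold_one arr (pvWin mid hi) _ (pvFold_one_ge arr _)]

theorem pvB_win (arr : List Int) :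
    find_length_2_alt arr = (pvWin 0 arr.length).foldl (pvStep arr) 1 := by
  unfold find_length_2_alt
  by_cases h : arr = []
  · rw [if_pos h, h]
    rfl
  · rw [if_neg h]
    exact pvSolve_eq arr arr.length 0 arr.length (by omega)

-- ===== VERDICT (by name: the statement is the Claim_ definition above) =====
theorem find_length_2_spec : Claim_equal_find_length_2 := by
  intro arr _
  unfold Spec_find_length_2
  rw [pvA_win, pvB_win]
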